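-- pv_equiv track=rewrite | github.com/pieterdavid/adventofcode2020 | day06.py | collect_questions_2
-- ===== SOURCE A (Python) =====
-- from itertools import groupby
--
-- def readGroups(lines):
--     for bV,lnGrp in groupby((ln.strip() for ln in lines), bool):
--         if bV:
--             yield lnGrp
--
-- def collect_questions_2(inputLines):
--     questions_per_group = []
--     for grp in readGroups(inputLines):
--         allAnswered = None
--         for ln in grp:
--             if allAnswered is None:
--                 allAnswered = ln
--             else:
--                 allAnswered = "".join(c for c in allAnswered if c in ln)
--         questions_per_group.append(allAnswered)
--     return questions_per_group
-- ===== SOURCE B (Python) =====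
-- def collect_questions_2(inputLines):
--     # Single pass: hold the group's first line as the reference and filter it
--     # by membership in every later line of the group (preserves order/duplicates).
--     res = []
--     first = None
--     rest = []
--     for ln in inputLines:
--         s = ln.strip()
--         if s:
--             if first is None:
--                 first = s
--             else:
--                 rest.append(s)
--         elif first is not None:
--             res.append("".join(c for c in first if all(c in r for r in rest)))
--             first = None
--             rest = []
--     if first is not None:
--         res.append("".join(c for c in first if all(c in r for r in rest)))
--     return res
-- ===== Notes on version B (the rewrite author's own statement) =====
-- stated objective: alternative
-- what changed: Replaces the groupby-generator plus line-by-line shrinking accumulator (rebuilding the joined intersection string after every line) with one explicit pass over the raw lines that holds the group's first line and filters it once by an all() membership test over the remaining lines of the group.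
import Mathlib
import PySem

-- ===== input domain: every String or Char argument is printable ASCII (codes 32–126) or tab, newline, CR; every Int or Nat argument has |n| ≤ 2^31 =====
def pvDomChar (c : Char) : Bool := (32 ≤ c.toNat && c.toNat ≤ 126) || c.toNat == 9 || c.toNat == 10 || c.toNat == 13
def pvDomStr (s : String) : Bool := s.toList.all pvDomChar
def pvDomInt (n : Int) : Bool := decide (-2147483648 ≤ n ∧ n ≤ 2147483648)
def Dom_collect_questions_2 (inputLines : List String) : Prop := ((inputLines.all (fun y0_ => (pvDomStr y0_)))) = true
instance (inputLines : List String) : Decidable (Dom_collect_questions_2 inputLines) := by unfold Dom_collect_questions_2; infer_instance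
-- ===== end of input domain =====

-- B restructures A (groupby generator + shrinking accumulator) into one pass that
-- filters the group's first line by membership in all later lines; same cost (objective: alternative).

-- ===== PORT A =====
-- readGroups: groupby the stripped lines on truthiness, yield the truthy runs
def pyReadGroups : List String → List (List String)
  | [] => []
  | s :: rest =>
    if s = "" then pyReadGroups rest
    else (s :: rest.takeWhile (fun t => t != "")) ::
         pyReadGroups (rest.dropWhile (fun t => t != ""))
termination_by l => l.length
decreasing_by
  · simp
  · have := List.length_dropWhile_le (fun t => t != "") rest
    simp; omega

def collect_questions_2 (inputLines : List String) : List String :=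
  (pyReadGroups (inputLines.map PySem.Str.strip)).foldl
    (fun qs grp =>
      qs ++ [(grp.foldl
        (fun allAnswered ln =>
          match allAnswered with
          | none => some ln
          | some a => some (String.ofList (a.toList.filter (fun c => ln.toList.contains c))))
        none).getD ""])   -- groups yielded by readGroups are nonempty, so the accumulator is never None here
    []

-- ===== PORT B =====
def bIsect (first : String) (rest : List String) : String :=
  String.ofList (first.toList.filter (fun c => rest.all (fun r => r.toList.contains c)))

def bStep (st : List String × Option String × List String) (ln : String) :
    List String × Option String × List String :=
  let s := PySem.Str.strip ln
  if s = "" then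
    match st.2.1 with
    | none => st
    | some f => (st.1 ++ [bIsect f st.2.2], none, [])
  else
    match st.2.1 with
    | none => (st.1, some s, st.2.2)
    | some f => (st.1, some f, st.2.2 ++ [s])

def collect_questions_2_alt (inputLines : List String) : List String :=
  let st := inputLines.foldl bStep ([], none, [])
  match st.2.1 with
  | none => st.1
  | some f => st.1 ++ [bIsect f st.2.2]

-- ===== PRECONDITION & SPEC =====
def Spec_collect_questions_2 (inputLines : List String) (out : List String) : Prop := out = collect_questions_2_alt inputLines
instance (inputLines : List String) (out : List String) : Decidable (Spec_collect_questions_2 inputLines out) := by unfold Spec_collect_questions_2; infer_instance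

-- ===== CLAIM (what is proved, stated in full; the proofs are below) =====
def Claim_equal_collect_questions_2 : Prop := ∀ (inputLines : List String), Dom_collect_questions_2 inputLines → Spec_collect_questions_2 inputLines (collect_questions_2 inputLines)

-- ===== LEMMAS AND PROOFS =====

-- A's per-group body, named for the proofs
def aGroup (grp : List String) : String :=
  (grp.foldl
    (fun allAnswered ln =>
      match allAnswered with
      | none => some ln
      | some a => some (String.ofList (a.toList.filter (fun c => ln.toList.contains c))))
    none).getD ""

-- B's step on an already-stripped line
def bStepS (st : List String × Option String × List String) (s : String) :
    List String × Option String × List String :=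
  if s = "" then
    match st.2.1 with
    | none => st
    | some f => (st.1 ++ [bIsect f st.2.2], none, [])
  else
    match st.2.1 with
    | none => (st.1, some s, st.2.2)
    | some f => (st.1, some f, st.2.2 ++ [s])

def bFin (st : List String × Option String × List String) : List String :=
  match st.2.1 with
  | none => st.1
  | some f => st.1 ++ [bIsect f st.2.2]

lemma foldA_app (l : List (List String)) (acc : List String) :
    l.foldl (fun qs grp =>
      qs ++ [(grp.foldl
        (fun allAnswered ln =>
          match allAnswered with
          | none => some ln
          | some a => some (String.ofList (a.toList.filter (fun c => ln.toList.contains c))))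
        none).getD ""]) acc = acc ++ l.map aGroup := by
  induction l generalizing acc with
  | nil => simp
  | cons g l ih =>
    rw [List.foldl_cons, ih]
    show (acc ++ [aGroup g]) ++ List.map aGroup l = acc ++ List.map aGroup (g :: l)
    simp

lemma foldA_some (rest : List String) (a : String) :
    rest.foldl
      (fun allAnswered ln =>
        match allAnswered with
        | none => some ln
        | some x => some (String.ofList (x.toList.filter (fun c => ln.toList.contains c))))
      (some a) = some (bIsect a rest) := by
  induction rest generalizing a with
  | nil => simp [bIsect]
  | cons r rs ih =>
    rw [List.foldl_cons, ih]
    simp only [bIsect, String.toList_ofList, List.filter_filter, Option.some.injEq]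
    congr 1
    apply List.filter_congr
    intro c _
    simp [Bool.and_comm]

lemma aGroup_cons (s : String) (g : List String) : aGroup (s :: g) = bIsect s g := by
  show (g.foldl
      (fun allAnswered ln =>
        match allAnswered with
        | none => some ln
        | some x => some (String.ofList (x.toList.filter (fun c => ln.toList.contains c))))
      (some s)).getD "" = bIsect s g
  rw [foldA_some]
  rfl

lemma main_lemma (L : List String) :
    (∀ res, bFin (L.foldl bStepS (res, none, [])) = res ++ (pyReadGroups L).map aGroup)
    ∧ (∀ res f rs, bFin (L.foldl bStepS (res, some f, rs)) =
        res ++ [bIsect f (rs ++ L.takeWhile (fun t => t != ""))]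
            ++ (pyReadGroups (L.dropWhile (fun t => t != ""))).map aGroup) := by
  induction L with
  | nil =>
    constructor
    · intro res; simp [bFin, pyReadGroups]
    · intro res f rs
      simp [bFin, pyReadGroups]
  | cons x L ih =>
    constructor
    · intro res
      by_cases hx : x = ""
      · subst hx
        simpa [bStepS, pyReadGroups] using ih.1 res
      · rw [List.foldl_cons]
        have hstep : bStepS (res, none, []) x = (res, some x, []) := by
          simp [bStepS, hx]
        rw [hstep, ih.2 res x []]
        conv_rhs => rw [pyReadGroups.eq_def]
        simp [hx, aGroup_cons]
    · intro res f rs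
      by_cases hx : x = ""
      · subst hx
        rw [List.foldl_cons]
        have hstep : bStepS (res, some f, rs) "" = (res ++ [bIsect f rs], none, []) := by
          simp [bStepS]
        rw [hstep, ih.1 (res ++ [bIsect f rs])]
        conv_rhs => rw [pyReadGroups.eq_def]
        simp
      · rw [List.foldl_cons]
        have hstep : bStepS (res, some f, rs) x = (res, some f, rs ++ [x]) := by
          simp [bStepS, hx]
        rw [hstep, ih.2 res f (rs ++ [x])]
        simp [hx, List.append_assoc]

-- ===== VERDICT (by name: the statement is the Claim_ definition above) =====
theorem collect_questions_2_spec : Claim_equal_collect_questions_2 := by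
  intro inputLines _
  unfold Spec_collect_questions_2 collect_questions_2 collect_questions_2_alt
  have hmap : inputLines.foldl bStep ([], none, []) =
      (inputLines.map PySem.Str.strip).foldl bStepS ([], none, []) := by
    rw [List.foldl_map]
    rfl
  rw [foldA_app]
  show [] ++ List.map aGroup (pyReadGroups (inputLines.map PySem.Str.strip))
      = bFin (inputLines.foldl bStep ([], none, []))
  rw [hmap, (main_lemma (inputLines.map PySem.Str.strip)).1 []]
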